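-- pv_equiv track=rewrite | github.com/wenqian-ye/FML-HW2 | svm/q4.py | split_integer
-- ===== SOURCE A (Python) =====
-- def split_integer(m, n):
--     quotient = int(m / n)
--     remainder = m % n
--     if remainder > 0:
--         out_list = [quotient] * (n - remainder) + [quotient + 1] * remainder
--     elif remainder < 0:
--         out_list = [quotient - 1] * -remainder + [quotient] * (n + remainder)
--     else:
--         out_list = [quotient] * n
--     for i in range(1, len(out_list)):
--         out_list[i] = out_list[i-1] + out_list[i]
--     return [0] + out_list
-- ===== SOURCE B (Python) =====
-- def split_integer(m, n):
--     quotient = int(m / n)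
--     remainder = m % n
--     return [i * quotient + max(0, i - (n - remainder)) for i in range(n + 1)]
-- ===== Notes on version B (the rewrite author's own statement) =====
-- stated objective: simpler
-- what changed: Replaces the intermediate parts list and the in-place cumulative-sum loop by a single list comprehension that computes each of the n+1 prefix boundary points directly from the closed form i*quotient + max(0, i-(n-remainder)).
-- outside the precondition, e.g. on split_integer(7, -3): A returns [0, -3, -6], B returns []; on split_integer(-7, -3): A returns [0, 1], B returns []
import Mathlib
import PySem

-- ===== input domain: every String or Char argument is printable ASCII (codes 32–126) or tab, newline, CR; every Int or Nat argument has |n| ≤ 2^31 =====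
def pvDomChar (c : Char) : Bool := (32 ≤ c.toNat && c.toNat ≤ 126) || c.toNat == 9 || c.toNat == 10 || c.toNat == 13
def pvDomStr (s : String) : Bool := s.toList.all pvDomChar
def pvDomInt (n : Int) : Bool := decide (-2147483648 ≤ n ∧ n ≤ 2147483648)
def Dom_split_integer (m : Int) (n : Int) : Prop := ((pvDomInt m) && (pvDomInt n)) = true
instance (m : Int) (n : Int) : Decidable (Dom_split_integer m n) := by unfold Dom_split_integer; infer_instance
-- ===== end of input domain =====

-- B replaces A's parts list + in-place cumulative-sum loop by one closed-form comprehension (simpler; not faster).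

-- ===== PORT A =====
def split_integer (m : Int) (n : Int) : List Int :=
  let quotient := PySem.Int.truncdiv m n          -- int(m / n); exact on Dom (|m|,|n| ≤ 2^31 < 2^53)
  let remainder := PySem.Int.mod m n
  let out_list :=
    if remainder > 0 then
      List.replicate (n - remainder).toNat quotient ++ List.replicate remainder.toNat (quotient + 1)
    else if remainder < 0 then
      List.replicate (-remainder).toNat (quotient - 1) ++ List.replicate (n + remainder).toNat quotient
    else
      List.replicate n.toNat quotient
  0 :: (PySem.List.pyRange 1 (PySem.List.len out_list) 1).foldl
        (fun st i => PySem.List.pySetD st i (PySem.List.pyGetD st (i - 1) 0 + PySem.List.pyGetD st i 0))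
        out_list

-- ===== PORT B =====
def split_integer_alt (m : Int) (n : Int) : List Int :=
  let quotient := PySem.Int.truncdiv m n          -- int(m / n); exact on Dom
  let remainder := PySem.Int.mod m n
  (PySem.List.pyRange 0 (n + 1) 1).map (fun i => i * quotient + max 0 (i - (n - remainder)))

-- ===== PRECONDITION & SPEC =====
-- Pre_ restricts to the task's natural domain n ≥ 1 (split into a positive number of parts): it excludes
-- n = 0, where A raises ZeroDivisionError, and n < 0, where A's output (shaped by Python's empty negative
-- list-repetition) is outside that natural domain and B returns [].
def Pre_split_integer (m : Int) (n : Int) : Prop := 1 ≤ n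
instance (m : Int) (n : Int) : Decidable (Pre_split_integer m n) := by unfold Pre_split_integer; infer_instance
def pvWitness_split_integer : Int × Int := (7, 3)

def Spec_split_integer (m : Int) (n : Int) (out : List Int) : Prop := out = split_integer_alt m n
instance (m : Int) (n : Int) (out : List Int) : Decidable (Spec_split_integer m n out) := by unfold Spec_split_integer; infer_instance

-- ===== CLAIM (what is proved, stated in full; the proofs are below) =====
def Claim_equal_split_integer : Prop := ∀ (m : Int) (n : Int), Dom_split_integer m n → Pre_split_integer m n → Spec_split_integer m n (split_integer m n)

-- ===== LEMMAS AND PROOFS =====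

-- Invariant for A's prefix-sum loop: once indices < a hold the prefix values g and indices ≥ a still hold
-- the original entries, the remaining iterations produce exactly (range len).map g.
theorem pv_loop_inv (g : Nat → Int) (orig : List Int)
    (hstep : ∀ j : Nat, 1 ≤ j → j < orig.length → g j = g (j - 1) + orig.getD j 0) :
    ∀ (k : Nat) (a : Int) (st : List Int),
      st.length = orig.length → 1 ≤ a → a + (k : Int) = (orig.length : Int) →
      (∀ j : Nat, (j : Int) < a → st.getD j 0 = g j) →
      (∀ j : Nat, a ≤ (j : Int) → st.getD j 0 = orig.getD j 0) →
      (PySem.List.pyRange a (orig.length : Int) 1).foldl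
        (fun st i => PySem.List.pySetD st i (PySem.List.pyGetD st (i - 1) 0 + PySem.List.pyGetD st i 0))
        st = (List.range orig.length).map g := by
  intro k
  induction k with
  | zero =>
      intro a st hlen ha hak hlow _
      rw [PySem.List.pyRange_one_eq_nil (by omega)]
      simp only [List.foldl_nil]
      apply List.ext_getElem
      · simpa using hlen
      · intro j hj hj'
        have hjl : j < orig.length := by simpa using hj'
        have := hlow j (by omega)
        rw [List.getD_eq_getElem _ _ hj] at this
        simpa [this] using this ▸ rfl
  | succ k ih =>
      intro a st hlen ha hak hlow hhigh
      have haN : a.toNat < orig.length := by omega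
      have haT : (a.toNat : Int) = a := by omega
      rw [PySem.List.pyRange_one_cons (by omega)]
      simp only [List.foldl_cons]
      have hget1 : PySem.List.pyGetD st (a - 1) 0 = g (a.toNat - 1) := by
        rw [show a - 1 = ((a.toNat - 1 : Nat) : Int) by omega, PySem.List.pyGetD_natCast]
        exact hlow _ (by omega)
      have hget2 : PySem.List.pyGetD st a 0 = orig.getD a.toNat 0 := by
        rw [← haT, PySem.List.pyGetD_natCast]
        exact hhigh _ (by omega)
      have hval : PySem.List.pyGetD st (a - 1) 0 + PySem.List.pyGetD st a 0 = g a.toNat := by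
        rw [hget1, hget2, ← hstep a.toNat (by omega) haN]
      have hset : PySem.List.pySetD st a (PySem.List.pyGetD st (a - 1) 0 + PySem.List.pyGetD st a 0)
          = st.set a.toNat (g a.toNat) := by
        rw [hval, ← haT, PySem.List.pySetD_natCast]
        simp only [Int.toNat_natCast]
      rw [hset]
      apply ih (a + 1)
      · simpa using hlen
      · omega
      · omega
      · intro j hj
        by_cases hja : j = a.toNat
        · subst hja
          simp [List.getD_eq_getElem?_getD, hlen ▸ haN]
        · have : (j : Int) < a := by omega
          rw [List.getD_eq_getElem?_getD, List.getElem?_set_ne (by omega),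
              ← List.getD_eq_getElem?_getD]
          exact hlow j this
      · intro j hj
        rw [List.getD_eq_getElem?_getD, List.getElem?_set_ne (by omega),
            ← List.getD_eq_getElem?_getD]
        exact hhigh j (by omega)

-- entries of the parts list: q for the first (n-r) slots, q+1 afterwards
theorem pv_orig_getD (s t : Nat) (v w : Int) (j : Nat) (hj : j < s + t) :
    (List.replicate s v ++ List.replicate t w).getD j 0 = if j < s then v else w := by
  rw [List.getD_eq_getElem _ _ (by simpa using hj)]
  by_cases h : j < s
  · rw [List.getElem_append_left (by simpa using h)]
    simp [h]
  · rw [List.getElem_append_right (by simpa using h)]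
    simp [h, List.getElem_replicate]

theorem split_integer_eq (m n : Int) (hn : 1 ≤ n) :
    split_integer m n = split_integer_alt m n := by
  simp only [split_integer, split_integer_alt]
  set q := PySem.Int.truncdiv m n with hq
  set r := PySem.Int.mod m n with hr
  have hr0 : 0 ≤ r := PySem.Int.mod_nonneg m (by omega)
  have hrn : r < n := PySem.Int.mod_lt m (by omega)
  -- A's parts list, both branches reachable under Pre_ written as one append
  have horig : (if r > 0 then
        List.replicate (n - r).toNat q ++ List.replicate r.toNat (q + 1)
      else if r < 0 then
        List.replicate (-r).toNat (q - 1) ++ List.replicate (n + r).toNat q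
      else List.replicate n.toNat q)
      = List.replicate (n - r).toNat q ++ List.replicate r.toNat (q + 1) := by
    split_ifs with h1 h2
    · rfl
    · omega
    · have : r = 0 := by omega
      simp [this]
  rw [horig]
  set orig := List.replicate (n - r).toNat q ++ List.replicate r.toNat (q + 1) with horigdef
  have hlen : orig.length = n.toNat := by simp [horigdef]; omega
  set g : Nat → Int := fun j => ((j : Int) + 1) * q + max 0 (((j : Int) + 1) - (n - r)) with hg
  have hgetD : ∀ j : Nat, j < orig.length → orig.getD j 0 = if (j : Int) < n - r then q else q + 1 := by
    intro j hj
    rw [horigdef, pv_orig_getD _ _ _ _ j (by simpa [horigdef] using hj)]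
    by_cases h : (j : Int) < n - r
    · simp [h, show j < (n - r).toNat by omega]
    · simp [h, show ¬ j < (n - r).toNat by omega]
  have hstep : ∀ j : Nat, 1 ≤ j → j < orig.length → g j = g (j - 1) + orig.getD j 0 := by
    intro j h1 hj
    rw [hgetD j hj]
    have hj' : (j : Int) < n := by omega
    simp only [hg]
    have hcast : ((j - 1 : Nat) : Int) = (j : Int) - 1 := by omega
    rw [hcast]
    by_cases h : (j : Int) < n - r
    · rw [if_pos h]
      have h2 : max 0 ((j : Int) + 1 - (n - r)) = 0 := by omega
      have h3 : max 0 ((j : Int) - 1 + 1 - (n - r)) = 0 := by omega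
      rw [h2, h3]; ring
    · rw [if_neg h]
      have h2 : max 0 ((j : Int) + 1 - (n - r)) = (j : Int) + 1 - (n - r) := by omega
      have h3 : max 0 ((j : Int) - 1 + 1 - (n - r)) = (j : Int) - (n - r) := by omega
      rw [h2, h3]; ring
  -- apply the invariant at a = 1, st = orig
  have hmain :
      (PySem.List.pyRange 1 (orig.length : Int) 1).foldl
        (fun st i => PySem.List.pySetD st i (PySem.List.pyGetD st (i - 1) 0 + PySem.List.pyGetD st i 0))
        orig = (List.range orig.length).map g := by
    apply pv_loop_inv g orig hstep (orig.length - 1) 1 orig rfl le_rfl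
    · omega
    · intro j hj
      have hj0 : j = 0 := by omega
      subst hj0
      rw [hgetD 0 (by omega)]
      simp only [hg]
      rw [if_pos (by omega)]
      simp
      omega
    · intro j _
      rfl
  rw [show PySem.List.len orig = (orig.length : Int) from PySem.List.len_eq orig, hmain]
  -- B's side: peel off i = 0 from range(n+1)
  rw [PySem.List.pyRange_one]
  have hnt : (n + 1 - 0).toNat = n.toNat + 1 := by omega
  rw [hnt, List.range_succ_eq_map]
  simp only [List.map_cons, List.map_map]
  congr 1
  · simp
    omega
  · rw [hlen]
    apply List.map_congr_left
    intro j hj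
    have hjn : j < n.toNat := by simpa using hj
    simp only [Function.comp, hg]
    have hsucc : ((j.succ : Nat) : Int) = (j : Int) + 1 := by omega
    simp [hsucc]

-- ===== VERDICT (by name: the statement is the Claim_ definition above) =====
theorem split_integer_spec : Claim_equal_split_integer := by
  intro m n _ hpre
  exact split_integer_eq m n hpre
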